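-- pv_equiv track=rewrite | github.com/hckkid/RSA-Python | fun_compare.py | isgreater
-- ===== SOURCE A (Python) =====
-- def isgreater(p,q):
--     flag=False
--     if(len(p)>0):
--         if(len(p)>len(q)):
--             flag=True
--         elif(len(p)<len(q)):
--             flag=False
--         elif(p[len(p)-1]>q[len(q)-1]):
--             flag=True
--         elif(p[len(p)-1]<q[len(q)-1]):
--             flag=False
--         else:
--             flag=isgreater(p[0:len(p)-1],q[0:len(q)-1])
--     return flag
-- ===== SOURCE B (Python) =====
-- def isgreater(p, q):
--     if len(p) == 0:
--         return False
--     if len(p) != len(q):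
--         return len(p) > len(q)
--     for a, b in zip(reversed(p), reversed(q)):
--         if a != b:
--             return a > b
--     return False
-- ===== Notes on version B (the rewrite author's own statement) =====
-- stated objective: faster
-- what changed: replaced A's recursion that slices copies of both lists at every step (quadratic) with a single backward scan over zip(reversed(p), reversed(q)) that returns at the first differing digit
import Mathlib
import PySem

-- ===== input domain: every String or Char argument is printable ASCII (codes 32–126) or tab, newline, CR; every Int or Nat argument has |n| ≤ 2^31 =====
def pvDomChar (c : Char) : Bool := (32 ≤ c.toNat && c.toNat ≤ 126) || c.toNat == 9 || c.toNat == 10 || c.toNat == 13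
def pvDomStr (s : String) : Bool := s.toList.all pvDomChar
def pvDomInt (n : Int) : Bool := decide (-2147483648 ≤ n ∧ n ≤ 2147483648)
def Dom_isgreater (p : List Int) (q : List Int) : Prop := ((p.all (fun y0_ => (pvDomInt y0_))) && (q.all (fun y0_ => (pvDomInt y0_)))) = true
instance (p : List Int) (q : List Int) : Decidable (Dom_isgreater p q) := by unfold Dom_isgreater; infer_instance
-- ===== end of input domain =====

-- B replaces A's recursion with list slicing (quadratic copying) by one backward scan; objective: faster.

-- ===== PORT A =====
-- literal transliteration of A: compare lengths, then last elements, else recurse on p[0:len-1], q[0:len-1]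
def isgreater (p : List Int) (q : List Int) : Bool :=
  if 0 < p.length then
    if p.length > q.length then true
    else if p.length < q.length then false
    else if PySem.List.pyGetD p ((p.length : Int) - 1) 0 > PySem.List.pyGetD q ((q.length : Int) - 1) 0 then true
    else if PySem.List.pyGetD p ((p.length : Int) - 1) 0 < PySem.List.pyGetD q ((q.length : Int) - 1) 0 then false
    else isgreater (PySem.List.slice p (some 0) (some ((p.length : Int) - 1)))
                   (PySem.List.slice q (some 0) (some ((q.length : Int) - 1)))
  else false
termination_by p.length
decreasing_by
  rw [PySem.List.slice_toNat _ (by omega) (by omega)]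
  simp
  omega

-- ===== PORT B =====
-- the for-loop over zip(reversed(p), reversed(q)): first differing pair decides
def scanRev : List Int → List Int → Bool
  | a :: as, b :: bs => if a ≠ b then decide (a > b) else scanRev as bs
  | _, _ => false

def isgreater_alt (p : List Int) (q : List Int) : Bool :=
  if p.length = 0 then false
  else if p.length ≠ q.length then decide (p.length > q.length)
  else scanRev p.reverse q.reverse

-- ===== PRECONDITION & SPEC =====
def Spec_isgreater (p : List Int) (q : List Int) (out : Bool) : Prop := out = isgreater_alt p q
instance (p : List Int) (q : List Int) (out : Bool) : Decidable (Spec_isgreater p q out) := by unfold Spec_isgreater; infer_instance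

-- ===== CLAIM (what is proved, stated in full; the proofs are below) =====
def Claim_equal_isgreater : Prop := ∀ (p : List Int) (q : List Int), Dom_isgreater p q → Spec_isgreater p q (isgreater p q)

-- ===== LEMMAS AND PROOFS =====

theorem pyGetD_concat_length (l : List Int) (a : Int) :
    PySem.List.pyGetD (l ++ [a]) ((l.length : Int)) 0 = a := by
  rw [PySem.List.pyGetD_natCast]
  simp

theorem slice_concat (l : List Int) (a : Int) :
    PySem.List.slice (l ++ [a]) (some 0) (some ((l.length : Int))) = l := by
  rw [PySem.List.slice_toNat _ (by omega) (by omega)]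
  simp

theorem isgreater_rev_eq_scanRev (rp rq : List Int) (h : rp.length = rq.length) :
    isgreater rp.reverse rq.reverse = scanRev rp rq := by
  induction rp generalizing rq with
  | nil =>
    have : rq = [] := List.length_eq_zero_iff.mp h.symm
    subst this
    simp [isgreater.eq_def, scanRev]
  | cons a as ih =>
    match rq, h with
    | b :: bs, h =>
      have hlen : as.length = bs.length := by simpa using h
      have hp : (a :: as).reverse = as.reverse ++ [a] := by simp
      have hq : (b :: bs).reverse = bs.reverse ++ [b] := by simp
      rw [hp, hq, isgreater.eq_def]
      have hpl : (((as.reverse ++ [a]).length : Int)) - 1 = ((as.reverse.length : Nat) : Int) := by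
        push_cast [List.length_append, List.length_reverse, List.length_cons, List.length_nil]; ring
      have hql : (((bs.reverse ++ [b]).length : Int)) - 1 = ((bs.reverse.length : Nat) : Int) := by
        push_cast [List.length_append, List.length_reverse, List.length_cons, List.length_nil]; ring
      rw [hpl, hql, pyGetD_concat_length, pyGetD_concat_length, slice_concat, slice_concat]
      simp only [scanRev]
      by_cases hab : a = b
      · subst hab
        rw [if_pos (by simp), if_neg (by simp [hlen]), if_neg (by simp [hlen]),
            if_neg (by omega), if_neg (by omega), if_neg (by simp)]
        exact ih bs hlen
      · rcases lt_or_gt_of_ne hab with hlt | hgt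
        · rw [if_pos (by simp), if_neg (by simp [hlen]), if_neg (by simp [hlen]),
              if_neg (by omega), if_pos hlt, if_pos hab]
          simp; omega
        · rw [if_pos (by simp), if_neg (by simp [hlen]), if_neg (by simp [hlen]),
              if_pos hgt, if_pos hab]
          simp [hgt]

-- ===== VERDICT (by name: the statement is the Claim_ definition above) =====
theorem isgreater_spec : Claim_equal_isgreater := by
  unfold Claim_equal_isgreater
  intro p q _
  unfold Spec_isgreater isgreater_alt
  by_cases hp0 : p.length = 0
  · have : p = [] := List.length_eq_zero_iff.mp hp0
    subst this
    simp [isgreater.eq_def]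
  · by_cases hlen : p.length = q.length
    · have := isgreater_rev_eq_scanRev p.reverse q.reverse (by simpa using hlen)
      simp only [List.reverse_reverse] at this
      rw [if_neg hp0, if_neg (by simp [hlen])]
      exact this
    · rw [if_neg hp0, if_pos hlen, isgreater.eq_def]
      split_ifs with h1 h2 h3 <;> simp_all <;> omega
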